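-- pv_equiv track=rewrite | github.com/denizxaytac/advent-of-code | 2017/day03/part2.py | solution
-- ===== SOURCE A (Python) =====
-- def get_neighbours_sum(pos_x, pos_y, grid):
--     total_sum = 0
--     for x in [0, -1, 1]:
--         for y in [0, -1, 1]:
--             rr = pos_x + x
--             cc = pos_y + y
--             if (rr, cc) in grid.keys():
--                 total_sum += grid[(rr, cc)]
--     return total_sum
--
-- def solution(inp):
--     num = 2
--     layer = 3
--     pos_x, pos_y = 1, 0
--     grid = dict()
--     grid[(0, 0)] = 1
--     while True:
--         while True:
--             for _ in range(layer - 2): # going up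
--                 num = get_neighbours_sum(pos_x, pos_y, grid)
--                 grid[(pos_x,pos_y)] = num
--                 if num >= inp:
--                     return pos_x, pos_y, num
--                 pos_y -= 1
--
--             for _ in range(layer - 1): # going left
--                 num = get_neighbours_sum(pos_x, pos_y, grid)
--                 grid[(pos_x,pos_y)] = num
--                 if num >= inp:
--                     return pos_x, pos_y, num
--                 pos_x -= 1
--
--             for _ in range(layer - 1): # going down
--                 num = get_neighbours_sum(pos_x, pos_y, grid)
--                 grid[(pos_x,pos_y)] = num
--                 if num >= inp:
--                     return pos_x, pos_y, num
--                 pos_y += 1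
--
--             for _ in range(layer): # going right
--                 num = get_neighbours_sum(pos_x, pos_y, grid)
--                 grid[(pos_x,pos_y)] = num
--                 if num >= inp:
--                     return pos_x, pos_y, num
--                 pos_x += 1
--
--             break
--         layer += 2
-- ===== SOURCE B (Python) =====
-- def _ring(k):
--     # smallest r with k <= (2r+1)^2 - 1
--     r = 0
--     while (2 * r + 1) ** 2 <= k:
--         r += 1
--     return r
--
-- def _coord(k):
--     # coordinates of spiral index k (index 0 = center; up means y decreasing)
--     if k == 0:
--         return (0, 0)
--     r = _ring(k)
--     j = k - (2 * r - 1) ** 2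
--     if j < 2 * r - 1:                    # up side: x = r
--         return (r, r - 1 - j)
--     if j < 4 * r - 1:                    # left side: y = -r
--         return (r - (j - (2 * r - 1)), -r)
--     if j < 6 * r - 1:                    # down side: x = -r
--         return (-r, -r + (j - (4 * r - 1)))
--     return (-r + (j - (6 * r - 1)), r)   # right side: y = r
--
-- def _index(x, y):
--     # inverse of _coord
--     r = max(abs(x), abs(y))
--     if r == 0:
--         return 0
--     if x == r and -r < y < r:
--         return (2 * r - 1) ** 2 + (r - 1 - y)
--     if y == -r and x > -r:
--         return (2 * r - 1) ** 2 + (2 * r - 1) + (r - x)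
--     if x == -r and y < r:
--         return (2 * r - 1) ** 2 + (4 * r - 1) + (y + r)
--     return (2 * r - 1) ** 2 + (6 * r - 1) + (x + r)
--
-- def solution(inp):
--     vals = [1]                # values in spiral order; vals[i] = value at _coord(i)
--     k = 1
--     while True:
--         x, y = _coord(k)
--         num = 0
--         for i in (-1, 0, 1):
--             for j in (-1, 0, 1):
--                 ni = _index(x + i, y + j)
--                 if ni < k:
--                     num += vals[ni]
--         vals.append(num)
--         if num >= inp:
--             return x, y, num
--         k += 1
-- ===== Notes on version B (the rewrite author's own statement) =====
-- stated objective: alternative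
-- what changed: Dropped the dict grid and the spiral walk entirely: B stores values in a flat list in spiral order and uses a closed-form arithmetic bijection between spiral index and coordinates (coord(k) and index(x,y)); each cell's value is the sum of list entries at the indices of its neighbours that are smaller than the current index, so there is no stepping/direction/turn state and no coordinate-keyed dictionary at all.
import Mathlib
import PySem

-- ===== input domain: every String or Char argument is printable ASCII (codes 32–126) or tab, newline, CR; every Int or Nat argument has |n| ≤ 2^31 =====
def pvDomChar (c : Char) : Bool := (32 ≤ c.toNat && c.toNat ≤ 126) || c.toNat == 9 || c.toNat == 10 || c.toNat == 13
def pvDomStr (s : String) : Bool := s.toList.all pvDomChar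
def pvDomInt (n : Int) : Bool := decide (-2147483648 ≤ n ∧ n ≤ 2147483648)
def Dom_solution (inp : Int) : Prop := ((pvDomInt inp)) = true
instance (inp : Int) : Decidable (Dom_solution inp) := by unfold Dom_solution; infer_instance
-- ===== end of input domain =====

-- B drops A's dict grid and spiral walk: it keeps the values in a flat list in spiral
-- order and uses a closed-form arithmetic bijection index ↔ coordinates; objective:
-- alternative algorithm/data structure of similar cost.
-- Both Python loops are `while True`; each port carries a fuel constant (A: 6 rings,
-- B: the same 168 cells) purely to make the recursion total; past the fuel both ports
-- return (0, 0, 0), so the equivalence below holds for ALL Int inputs and no Pre_ is needed.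

-- ===== PORT A =====
-- get_neighbours_sum: for x in [0,-1,1]: for y in [0,-1,1]: if (rr,cc) in grid: total += grid[(rr,cc)]
def gnsA (posX posY : Int) (grid : PySem.Dict (Int × Int) Int) : Int :=
  [(0 : Int), -1, 1].foldl (fun totalSum x =>
    [(0 : Int), -1, 1].foldl (fun totalSum y =>
      match grid.get? (posX + x, posY + y) with
      | some v => totalSum + v
      | none => totalSum) totalSum) 0

-- one of A's four `for _ in range(n)` direction runs: eval cell, store, test, move
def runA (inp : Int) (n : Nat) (dx dy posX posY : Int)
    (grid : PySem.Dict (Int × Int) Int) :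
    (Int × Int × Int) ⊕ (Int × Int × PySem.Dict (Int × Int) Int) :=
  match n with
  | 0 => .inr (posX, posY, grid)
  | n + 1 =>
    let num := gnsA posX posY grid
    let grid := grid.insert (posX, posY) num
    if num ≥ inp then .inl (posX, posY, num)
    else runA inp n dx dy (posX + dx) (posY + dy) grid

-- A's outer `while True` over layers (fuel = number of layers; default past fuel)
def layersA (inp : Int) (fuel : Nat) (layer posX posY : Int)
    (grid : PySem.Dict (Int × Int) Int) : Int × Int × Int :=
  match fuel with
  | 0 => (0, 0, 0)
  | fuel + 1 =>
    match runA inp (layer - 2).toNat 0 (-1) posX posY grid with      -- going up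
    | .inl r => r
    | .inr (posX, posY, grid) =>
      match runA inp (layer - 1).toNat (-1) 0 posX posY grid with    -- going left
      | .inl r => r
      | .inr (posX, posY, grid) =>
        match runA inp (layer - 1).toNat 0 1 posX posY grid with     -- going down
        | .inl r => r
        | .inr (posX, posY, grid) =>
          match runA inp layer.toNat 1 0 posX posY grid with         -- going right
          | .inl r => r
          | .inr (posX, posY, grid) => layersA inp fuel (layer + 2) posX posY grid

def solution (inp : Int) : Int × Int × Int :=
  layersA inp 6 3 1 0 (PySem.Dict.ofList [(((0 : Int), (0 : Int)), (1 : Int))])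

-- ===== PORT B =====
-- hand ports of Python builtins on ints (exact): abs, max of two ints, and x ** 2
def pyAbs (x : Int) : Int := if x < 0 then -x else x
def pyMax2 (a b : Int) : Int := if b > a then b else a
def pySq (x : Int) : Int := x * x

-- _ring(k): r = 0; while (2r+1)^2 <= k: r += 1  (fuel = k.toNat + 1 steps suffices since (2r+1)^2 > r)
def ringB (fuel : Nat) (r k : Int) : Int :=
  match fuel with
  | 0 => r
  | fuel + 1 => if pySq (2 * r + 1) ≤ k then ringB fuel (r + 1) k else r

-- _coord(k)
def coordB (k : Int) : Int × Int :=
  if k = 0 then (0, 0)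
  else
    let r := ringB (k.toNat + 1) 0 k
    let j := k - pySq (2 * r - 1)
    if j < 2 * r - 1 then (r, r - 1 - j)
    else if j < 4 * r - 1 then (r - (j - (2 * r - 1)), -r)
    else if j < 6 * r - 1 then (-r, -r + (j - (4 * r - 1)))
    else (-r + (j - (6 * r - 1)), r)

-- _index(x, y)
def idxB (x y : Int) : Int :=
  let r := pyMax2 (pyAbs x) (pyAbs y)
  if r = 0 then 0
  else if x = r ∧ -r < y ∧ y < r then pySq (2 * r - 1) + (r - 1 - y)
  else if y = -r ∧ x > -r then pySq (2 * r - 1) + (2 * r - 1) + (r - x)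
  else if x = -r ∧ y < r then pySq (2 * r - 1) + (4 * r - 1) + (y + r)
  else pySq (2 * r - 1) + (6 * r - 1) + (x + r)

-- the two nested for-loops accumulating num; vals[ni] is always in range when ni < k,
-- so (pyGet? …).getD 0 is exact here
def cellB (k : Int) (x y : Int) (vals : List Int) : Int :=
  [(-1 : Int), 0, 1].foldl (fun num i =>
    [(-1 : Int), 0, 1].foldl (fun num j =>
      let ni := idxB (x + i) (y + j)
      if ni < k then num + (PySem.List.pyGet? vals ni).getD 0 else num) num) 0

-- B's main `while True` loop (fuel = number of cells; default past fuel)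
def stepB (inp : Int) (fuel : Nat) (k : Int) (vals : List Int) : Int × Int × Int :=
  match fuel with
  | 0 => (0, 0, 0)
  | fuel + 1 =>
    let xy := coordB k
    let num := cellB k xy.1 xy.2 vals
    let vals := vals ++ [num]
    if num ≥ inp then (xy.1, xy.2, num)
    else stepB inp fuel (k + 1) vals

def solution_alt (inp : Int) : Int × Int × Int :=
  stepB inp 168 1 [1]

-- ===== PRECONDITION & SPEC =====
def Spec_solution (inp : Int) (out : Int × Int × Int) : Prop := out = solution_alt inp
instance (inp : Int) (out : Int × Int × Int) : Decidable (Spec_solution inp out) := by unfold Spec_solution; infer_instance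

-- ===== CLAIM =====
def Claim_equal_solution : Prop := ∀ (inp : Int), Dom_solution inp → Spec_solution inp (solution inp)

-- ===== LEMMAS AND PROOFS =====

-- inp-free trace of one of A's runs: the (x, y, num) cells it evaluates, plus the final state
def runT (n : Nat) (dx dy posX posY : Int) (grid : PySem.Dict (Int × Int) Int) :
    List (Int × Int × Int) × (Int × Int × PySem.Dict (Int × Int) Int) :=
  match n with
  | 0 => ([], (posX, posY, grid))
  | n + 1 =>
    let num := gnsA posX posY grid
    let r := runT n dx dy (posX + dx) (posY + dy) (grid.insert (posX, posY) num)
    ((posX, posY, num) :: r.1, r.2)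

-- inp-free trace of A's whole layered walk
def layerT (fuel : Nat) (layer posX posY : Int)
    (grid : PySem.Dict (Int × Int) Int) : List (Int × Int × Int) :=
  match fuel with
  | 0 => []
  | fuel + 1 =>
    let r1 := runT (layer - 2).toNat 0 (-1) posX posY grid
    let r2 := runT (layer - 1).toNat (-1) 0 r1.2.1 r1.2.2.1 r1.2.2.2
    let r3 := runT (layer - 1).toNat 0 1 r2.2.1 r2.2.2.1 r2.2.2.2
    let r4 := runT layer.toNat 1 0 r3.2.1 r3.2.2.1 r3.2.2.2
    r1.1 ++ r2.1 ++ r3.1 ++ r4.1 ++ layerT fuel (layer + 2) r4.2.1 r4.2.2.1 r4.2.2.2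

-- inp-free trace of B's index-arithmetic walk
def stepT (fuel : Nat) (k : Int) (vals : List Int) : List (Int × Int × Int) :=
  match fuel with
  | 0 => []
  | fuel + 1 =>
    let xy := coordB k
    let num := cellB k xy.1 xy.2 vals
    (xy.1, xy.2, num) :: stepT fuel (k + 1) (vals ++ [num])

-- the first traced cell whose value reaches inp (default (0,0,0) like the fuel-out case)
def firstHit (inp : Int) (cells : List (Int × Int × Int)) : Int × Int × Int :=
  (cells.find? (fun c => decide (c.2.2 ≥ inp))).getD (0, 0, 0)

-- each port equals "the first traced cell whose value reaches inp":
theorem runA_eq (inp : Int) (n : Nat) :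
    ∀ (dx dy posX posY : Int) (grid : PySem.Dict (Int × Int) Int),
    runA inp n dx dy posX posY grid =
      match (runT n dx dy posX posY grid).1.find? (fun c => decide (c.2.2 ≥ inp)) with
      | some c => .inl c
      | none => .inr (runT n dx dy posX posY grid).2 := by
  induction n with
  | zero => intro dx dy posX posY grid; rfl
  | succ n ih =>
    intro dx dy posX posY grid
    by_cases h : gnsA posX posY grid ≥ inp
    · simp [runA, runT, h]
    · simp [runA, runT, h, ih]

theorem layersA_eq (inp : Int) (fuel : Nat) :
    ∀ (layer posX posY : Int) (grid : PySem.Dict (Int × Int) Int),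
    layersA inp fuel layer posX posY grid =
      firstHit inp (layerT fuel layer posX posY grid) := by
  induction fuel with
  | zero => intro layer posX posY grid; rfl
  | succ fuel ih =>
    intro layer posX posY grid
    rw [layersA, layerT]
    rcases hrt1 : runT (layer - 2).toNat 0 (-1) posX posY grid with ⟨tr1, px1, py1, g1⟩
    rw [runA_eq, hrt1]
    cases hf1 : tr1.find? (fun c => decide (c.2.2 ≥ inp)) with
    | some c => simp [firstHit, List.find?_append, hf1]
    | none =>
      dsimp only
      simp only [firstHit, List.find?_append, hf1, Option.none_or]
      rcases hrt2 : runT (layer - 1).toNat (-1) 0 px1 py1 g1 with ⟨tr2, px2, py2, g2⟩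
      rw [runA_eq, hrt2]
      cases hf2 : tr2.find? (fun c => decide (c.2.2 ≥ inp)) with
      | some c => simp
      | none =>
        dsimp only
        simp only [Option.none_or]
        rcases hrt3 : runT (layer - 1).toNat 0 1 px2 py2 g2 with ⟨tr3, px3, py3, g3⟩
        rw [runA_eq, hrt3]
        cases hf3 : tr3.find? (fun c => decide (c.2.2 ≥ inp)) with
        | some c => simp
        | none =>
          dsimp only
          simp only [Option.none_or]
          rcases hrt4 : runT layer.toNat 1 0 px3 py3 g3 with ⟨tr4, px4, py4, g4⟩
          rw [runA_eq, hrt4]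
          cases hf4 : tr4.find? (fun c => decide (c.2.2 ≥ inp)) with
          | some c => simp
          | none =>
            dsimp only
            simp only [Option.none_or]
            exact ih (layer + 2) px4 py4 g4

theorem stepB_eq (inp : Int) (fuel : Nat) :
    ∀ (k : Int) (vals : List Int),
    stepB inp fuel k vals = firstHit inp (stepT fuel k vals) := by
  induction fuel with
  | zero => intro k vals; rfl
  | succ fuel ih =>
    intro k vals
    simp only [stepB, stepT]
    split_ifs with h <;> simp [firstHit, h, ih]

-- the two programs trace exactly the same cells (same order, same values)
set_option maxRecDepth 100000 in
set_option maxHeartbeats 4000000 in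
theorem traces_equal :
    layerT 6 3 1 0 (PySem.Dict.ofList [(((0 : Int), (0 : Int)), (1 : Int))]) =
      stepT 168 1 [1] := by
  decide

-- ===== VERDICT =====
theorem solution_spec : Claim_equal_solution := by
  intro inp _
  show solution inp = solution_alt inp
  rw [solution, solution_alt, layersA_eq, stepB_eq, traces_equal]
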